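-- pv_equiv track=rewrite | github.com/qingni/rag-pipeline-hub | backend/src/providers/loaders/docling_serve_client.py | _detect_image_mime_type
-- ===== SOURCE A (Python) =====
-- from typing import Any, Dict, List, Optional, Tuple
--
-- def _detect_image_mime_type(src: str) -> Optional[str]:
--     """检测图片的 MIME 类型"""
--     if not src:
--         return None
--
--     # base64 图片
--     if src.startswith('data:'):
--         try:
--             header = src.split(',')[0]
--             if ';' in header:
--                 return header.split(':')[1].split(';')[0]
--         except (IndexError, ValueError):
--             pass
--         return 'image/png'
--
--     # 根据扩展名判断
--     src_lower = src.lower().split('?')[0]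
--
--     extension_map = {
--         '.jpg': 'image/jpeg',
--         '.jpeg': 'image/jpeg',
--         '.png': 'image/png',
--         '.gif': 'image/gif',
--         '.webp': 'image/webp',
--         '.svg': 'image/svg+xml',
--         '.ico': 'image/x-icon',
--         '.bmp': 'image/bmp',
--         '.avif': 'image/avif'
--     }
--
--     for ext, mime in extension_map.items():
--         if src_lower.endswith(ext):
--             return mime
--
--     return None
-- ===== SOURCE B (Python) =====
-- from typing import Optional
--
-- _EXTENSION_MAP = {
--     '.jpg': 'image/jpeg',
--     '.jpeg': 'image/jpeg',
--     '.png': 'image/png',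
--     '.gif': 'image/gif',
--     '.webp': 'image/webp',
--     '.svg': 'image/svg+xml',
--     '.ico': 'image/x-icon',
--     '.bmp': 'image/bmp',
--     '.avif': 'image/avif'
-- }
--
--
-- def _detect_image_mime_type(src: str) -> Optional[str]:
--     """检测图片的 MIME 类型 (index/slice based, no split, no endswith scan)"""
--     if src[:5] == 'data:':
--         comma = src.find(',')
--         header = src if comma == -1 else src[:comma]
--         if header.find(';') == -1:
--             return 'image/png'
--         # first ':' is the one after 'data'; mime runs to the next ':' or ';'
--         mid = header[header.find(':') + 1:]
--         c2 = mid.find(':')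
--         if c2 != -1:
--             mid = mid[:c2]
--         s2 = mid.find(';')
--         if s2 != -1:
--             mid = mid[:s2]
--         return mid
--     base = src.lower()
--     q = base.find('?')
--     if q != -1:
--         base = base[:q]
--     dot = base.rfind('.')
--     if dot == -1:
--         return None
--     return _EXTENSION_MAP.get(base[dot:])
-- ===== Notes on version B (the rewrite author's own statement) =====
-- stated objective: alternative
-- what changed: All split()/endswith machinery is replaced by index arithmetic: the data-URL mime is cut out with find/slice instead of a split chain, and the extension case takes the substring from the last dot and does one dict lookup instead of scanning the map with endswith.
import Mathlib
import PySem

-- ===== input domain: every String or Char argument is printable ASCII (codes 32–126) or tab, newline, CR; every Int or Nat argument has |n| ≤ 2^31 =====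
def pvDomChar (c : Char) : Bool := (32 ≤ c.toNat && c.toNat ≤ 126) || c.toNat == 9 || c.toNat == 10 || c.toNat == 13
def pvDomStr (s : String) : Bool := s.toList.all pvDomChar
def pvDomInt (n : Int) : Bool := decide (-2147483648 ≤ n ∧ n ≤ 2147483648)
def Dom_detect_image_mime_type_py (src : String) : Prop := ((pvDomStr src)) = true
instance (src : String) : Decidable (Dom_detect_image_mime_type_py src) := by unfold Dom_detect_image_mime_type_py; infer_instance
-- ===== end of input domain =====

-- B drops the split()/endswith machinery for index arithmetic: the data-URL mime is cut
-- out with find/slice, and the extension case is one dict lookup keyed by the substring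
-- from the last dot (objective: alternative). Return value only; no mutation.

-- ===== PORT A =====
def pvExtMapA : PySem.Dict String String := PySem.Dict.ofList
  [(".jpg", "image/jpeg"), (".jpeg", "image/jpeg"), (".png", "image/png"),
   (".gif", "image/gif"), (".webp", "image/webp"), (".svg", "image/svg+xml"),
   (".ico", "image/x-icon"), (".bmp", "image/bmp"), (".avif", "image/avif")]

def detect_image_mime_type_py (src : String) : Option String :=
  if src = "" then none
  else if PySem.Str.startswith src "data:" then
    -- header = src.split(',')[0]  (split of a nonempty separator never fails; [0] always exists)
    let header := ((PySem.Str.split? src ",").getD []).headD ""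
    if PySem.Str.isIn ";" header then
      -- try: return header.split(':')[1].split(';')[0]; except IndexError: return 'image/png'
      match PySem.List.pyGet? ((PySem.Str.split? header ":").getD []) 1 with
      | some part => some (((PySem.Str.split? part ";").getD []).headD "")
      | none => some "image/png"
    else some "image/png"
  else
    let src_lower := ((PySem.Str.split? (PySem.Str.lower src) "?").getD []).headD ""
    -- for ext, mime in extension_map.items(): if src_lower.endswith(ext): return mime
    pvExtMapA.items.findSome? (fun p => if PySem.Str.endswith src_lower p.1 then some p.2 else none)

-- ===== PORT B =====
def pvExtMapB : PySem.Dict String String := PySem.Dict.ofList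
  [(".jpg", "image/jpeg"), (".jpeg", "image/jpeg"), (".png", "image/png"),
   (".gif", "image/gif"), (".webp", "image/webp"), (".svg", "image/svg+xml"),
   (".ico", "image/x-icon"), (".bmp", "image/bmp"), (".avif", "image/avif")]

def detect_image_mime_type_py_alt (src : String) : Option String :=
  if PySem.Str.slice src none (some 5) = "data:" then
    let comma := PySem.Str.find src ","
    let header := if comma = -1 then src else PySem.Str.slice src none (some comma)
    if PySem.Str.find header ";" = -1 then some "image/png"
    else
      -- first ':' is the one after 'data'; mime runs to the next ':' or ';'
      let mid := PySem.Str.slice header (some (PySem.Str.find header ":" + 1)) none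
      let c2 := PySem.Str.find mid ":"
      let mid2 := if c2 = -1 then mid else PySem.Str.slice mid none (some c2)
      let s2 := PySem.Str.find mid2 ";"
      some (if s2 = -1 then mid2 else PySem.Str.slice mid2 none (some s2))
  else
    let base := PySem.Str.lower src
    let q := PySem.Str.find base "?"
    let base2 := if q = -1 then base else PySem.Str.slice base none (some q)
    let dot := PySem.Str.rfind base2 "."
    if dot = -1 then none
    else pvExtMapB.get? (PySem.Str.slice base2 (some dot) none)

-- ===== PRECONDITION & SPEC =====
def Spec_detect_image_mime_type_py (src : String) (out : Option String) : Prop := out = detect_image_mime_type_py_alt src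
instance (src : String) (out : Option String) : Decidable (Spec_detect_image_mime_type_py src out) := by unfold Spec_detect_image_mime_type_py; infer_instance

-- ===== CLAIM (what is proved, stated in full; the proofs are below) =====
def Claim_equal_detect_image_mime_type_py : Prop := ∀ (src : String), Dom_detect_image_mime_type_py src → Spec_detect_image_mime_type_py src (detect_image_mime_type_py src)

-- ===== LEMMAS AND PROOFS =====

-- `pvConsHead p x` prepends p onto the first chunk of x (chunk list of a split)
def pvConsHead (p : List Char) : List (List Char) → List (List Char)
  | [] => [p]
  | x :: xs => (p ++ x) :: xs

theorem pvConsHead_ne_nil (p : List Char) (x : List (List Char)) : pvConsHead p x ≠ [] := by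
  cases x <;> simp [pvConsHead]

theorem pvConsHead_consHead (p q : List Char) (x : List (List Char)) :
    pvConsHead p (pvConsHead q x) = pvConsHead (p ++ q) x := by
  cases x <;> simp [pvConsHead]

theorem pvConsHead_nil_of_ne {x : List (List Char)} (h : x ≠ []) : pvConsHead [] x = x := by
  cases x with
  | nil => exact absurd rfl h
  | cons a t => simp [pvConsHead]

-- behaviour of the fuelled split loop, stated against the top-level splitOn
theorem pv_go_spec (sep : List Char) (hsep : sep ≠ []) :
    ∀ (n : Nat) (l : List Char), l.length ≤ n → ∀ (fuel : Nat) (cur : List Char)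
      (acc : List (List Char)), l.length < fuel →
      PySem.Chars.splitOn.go sep fuel l cur acc
        = acc.reverse ++ pvConsHead cur.reverse (PySem.Chars.splitOn l sep) := by
  intro n
  induction n with
  | zero =>
    intro l hl fuel cur acc hf
    have hl0 : l = [] := by
      cases l with
      | nil => rfl
      | cons a t => simp at hl
    subst hl0
    cases fuel with
    | zero => omega
    | succ f =>
      simp [PySem.Chars.splitOn.go, PySem.Chars.splitOn, pvConsHead]
  | succ n ih =>
    intro l hl fuel cur acc hf
    cases l with
    | nil =>
      cases fuel with
      | zero => omega
      | succ f =>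
        simp [PySem.Chars.splitOn.go, PySem.Chars.splitOn, pvConsHead]
    | cons c rest =>
      cases fuel with
      | zero => omega
      | succ f =>
        by_cases hp : sep.isPrefixOf (c :: rest) = true
        · have hstep : PySem.Chars.splitOn.go sep (f+1) (c :: rest) cur acc
              = PySem.Chars.splitOn.go sep f (List.drop sep.length (c :: rest)) [] (cur.reverse :: acc) := by
            simp [PySem.Chars.splitOn.go, hp]
          have hseplen : 1 ≤ sep.length := by
            cases sep with
            | nil => exact absurd rfl hsep
            | cons a t => simp
          have hd : (List.drop sep.length (c :: rest)).length < (c :: rest).length := by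
            simp; omega
          have hIH := ih (List.drop sep.length (c :: rest)) (by simp at hl ⊢; omega) f []
            (cur.reverse :: acc) (by simp at hd hf ⊢; omega)
          have hsplit : PySem.Chars.splitOn (c :: rest) sep
              = [] :: pvConsHead [] (PySem.Chars.splitOn (List.drop sep.length (c :: rest)) sep) := by
            have h1 : PySem.Chars.splitOn (c :: rest) sep
                = PySem.Chars.splitOn.go sep ((c :: rest).length + 1) (c :: rest) [] [] := rfl
            rw [h1]
            have h2 : PySem.Chars.splitOn.go sep ((c :: rest).length + 1) (c :: rest) [] []
                = PySem.Chars.splitOn.go sep ((c :: rest).length) (List.drop sep.length (c :: rest)) [] [[]] := by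
              simp [PySem.Chars.splitOn.go, hp]
            rw [h2]
            have := ih (List.drop sep.length (c :: rest)) (by simp at hl ⊢; omega)
              ((c :: rest).length) [] [[]] (by simp at hd ⊢; omega)
            simpa using this
          rw [hstep, hIH, hsplit]
          simp [pvConsHead]
        · have hstep : PySem.Chars.splitOn.go sep (f+1) (c :: rest) cur acc
              = PySem.Chars.splitOn.go sep f rest (c :: cur) acc := by
            simp [PySem.Chars.splitOn.go, hp]
          have hIH := ih rest (by simp at hl; omega) f (c :: cur) acc (by simp at hf; omega)
          have hsplit : PySem.Chars.splitOn (c :: rest) sep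
              = pvConsHead [c] (PySem.Chars.splitOn rest sep) := by
            have h1 : PySem.Chars.splitOn (c :: rest) sep
                = PySem.Chars.splitOn.go sep ((c :: rest).length + 1) (c :: rest) [] [] := rfl
            rw [h1]
            have h2 : PySem.Chars.splitOn.go sep ((c :: rest).length + 1) (c :: rest) [] []
                = PySem.Chars.splitOn.go sep ((c :: rest).length) rest [c] [] := by
              simp [PySem.Chars.splitOn.go, hp]
            rw [h2]
            have := ih rest (by simp at hl; omega) ((c :: rest).length) [c] [] (by simp)
            simpa using this
          rw [hstep, hIH, hsplit]
          rw [pvConsHead_consHead]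
          simp

theorem pv_splitOn_ne_nil (sep l : List Char) (hsep : sep ≠ []) :
    PySem.Chars.splitOn l sep ≠ [] := by
  cases l with
  | nil =>
    simp [PySem.Chars.splitOn, PySem.Chars.splitOn.go]
  | cons c rest =>
    show PySem.Chars.splitOn.go sep ((c :: rest).length + 1) (c :: rest) [] [] ≠ []
    by_cases hp : sep.isPrefixOf (c :: rest) = true
    · have h2 : PySem.Chars.splitOn.go sep ((c :: rest).length + 1) (c :: rest) [] []
          = PySem.Chars.splitOn.go sep ((c :: rest).length) (List.drop sep.length (c :: rest)) [] [[]] := by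
        simp [PySem.Chars.splitOn.go, hp]
      have hseplen : 1 ≤ sep.length := by
        cases sep with
        | nil => exact absurd rfl hsep
        | cons a t => simp
      rw [h2, pv_go_spec sep hsep (List.drop sep.length (c :: rest)).length _ le_rfl _ [] [[]] (by simp; omega)]
      simp
    · have h2 : PySem.Chars.splitOn.go sep ((c :: rest).length + 1) (c :: rest) [] []
          = PySem.Chars.splitOn.go sep ((c :: rest).length) rest [c] [] := by
        simp [PySem.Chars.splitOn.go, hp]
      rw [h2, pv_go_spec sep hsep rest.length _ le_rfl _ [c] [] (by simp)]
      simp [pvConsHead_ne_nil]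

theorem pv_splitOn_cons_of_prefix (sep : List Char) (hsep : sep ≠ []) (c : Char) (rest : List Char)
    (hp : sep.isPrefixOf (c :: rest) = true) :
    PySem.Chars.splitOn (c :: rest) sep
      = [] :: PySem.Chars.splitOn (List.drop sep.length (c :: rest)) sep := by
  have hseplen : 1 ≤ sep.length := by
    cases sep with
    | nil => exact absurd rfl hsep
    | cons a t => simp
  show PySem.Chars.splitOn.go sep ((c :: rest).length + 1) (c :: rest) [] [] = _
  have h2 : PySem.Chars.splitOn.go sep ((c :: rest).length + 1) (c :: rest) [] []
      = PySem.Chars.splitOn.go sep ((c :: rest).length) (List.drop sep.length (c :: rest)) [] [[]] := by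
    simp [PySem.Chars.splitOn.go, hp]
  rw [h2, pv_go_spec sep hsep (List.drop sep.length (c :: rest)).length _ le_rfl _ [] [[]] (by simp; omega)]
  simp [pvConsHead_nil_of_ne (pv_splitOn_ne_nil sep _ hsep)]

theorem pv_splitOn_cons_of_not_prefix (sep : List Char) (hsep : sep ≠ []) (c : Char) (rest : List Char)
    (hp : ¬ sep.isPrefixOf (c :: rest) = true) :
    PySem.Chars.splitOn (c :: rest) sep
      = pvConsHead [c] (PySem.Chars.splitOn rest sep) := by
  show PySem.Chars.splitOn.go sep ((c :: rest).length + 1) (c :: rest) [] [] = _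
  have h2 : PySem.Chars.splitOn.go sep ((c :: rest).length + 1) (c :: rest) [] []
      = PySem.Chars.splitOn.go sep ((c :: rest).length) rest [c] [] := by
    simp [PySem.Chars.splitOn.go, hp]
  rw [h2, pv_go_spec sep hsep rest.length _ le_rfl _ [c] [] (by simp)]
  simp

theorem pv_splitOn_not_in (sep : List Char) (hsep : sep ≠ []) (l : List Char)
    (h : ¬ sep <:+: l) : PySem.Chars.splitOn l sep = [l] := by
  induction l with
  | nil => simp [PySem.Chars.splitOn, PySem.Chars.splitOn.go]
  | cons c rest ih =>
    have hp : ¬ sep.isPrefixOf (c :: rest) = true := by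
      intro hc
      exact h ((List.isPrefixOf_iff_prefix.mp hc).isInfix)
    rw [pv_splitOn_cons_of_not_prefix sep hsep c rest hp,
      ih (fun hc => h (hc.trans (List.infix_cons (List.infix_refl rest))))]
    rfl

theorem pv_splitOn_first (sep : List Char) (hsep : sep ≠ []) (f : Nat) :
    ∀ (l : List Char), sep <+: l.drop f → (∀ i, i < f → ¬ sep <+: l.drop i) →
      PySem.Chars.splitOn l sep
        = l.take f :: PySem.Chars.splitOn (l.drop (f + sep.length)) sep := by
  induction f with
  | zero =>
    intro l h1 h2
    simp only [List.drop_zero] at h1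
    cases l with
    | nil =>
      rcases h1 with ⟨t, ht⟩
      cases sep with
      | nil => exact absurd rfl hsep
      | cons a s => simp at ht
    | cons c rest =>
      rw [pv_splitOn_cons_of_prefix sep hsep c rest (List.isPrefixOf_iff_prefix.mpr h1)]
      simp
  | succ f ih =>
    intro l h1 h2
    cases l with
    | nil =>
      exact absurd (List.prefix_nil.mp (by simpa using h1)) hsep
    | cons c rest =>
      have hp : ¬ sep.isPrefixOf (c :: rest) = true := by
        intro hc
        exact h2 0 (by omega) (by simpa using List.isPrefixOf_iff_prefix.mp hc)
      rw [pv_splitOn_cons_of_not_prefix sep hsep c rest hp]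
      rw [ih rest (by simpa [List.drop_succ_cons] using h1)
        (fun i hi => by simpa [List.drop_succ_cons] using h2 (i+1) (by omega))]
      have : f + 1 + sep.length = (f + sep.length) + 1 := by omega
      rw [this, List.drop_succ_cons]
      simp [pvConsHead]

-- find = f from a first-occurrence description
theorem pv_find_eq_of_first (sep l : List Char) (f : Nat) (h1 : sep <+: l.drop f)
    (h2 : ∀ i, i < f → ¬ sep <+: l.drop i) : PySem.Chars.find l sep = (f : Int) := by
  have hin : sep <:+: l := by
    rcases h1 with ⟨t, ht⟩
    exact ⟨l.take f, t, by rw [List.append_assoc, ht, List.take_append_drop]⟩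
  have hnn : 0 ≤ PySem.Chars.find l sep := (PySem.Chars.find_nonneg_iff _ _).mpr hin
  obtain ⟨hpre, hmin⟩ := PySem.Chars.find_spec hnn
  set g := (PySem.Chars.find l sep).toNat with hg
  have : g = f := by
    rcases Nat.lt_trichotomy g f with h | h | h
    · exact absurd hpre (h2 g h)
    · exact h
    · exact absurd h1 (hmin f h)
  omega

-- head of a split = everything before the first occurrence of the separator
theorem pv_split_head (sep : List Char) (hsep : sep ≠ []) (s : List Char) :
    (PySem.Chars.splitOn s sep).headD []
      = if PySem.Chars.find s sep = -1 then s
        else s.take (PySem.Chars.find s sep).toNat := by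
  by_cases h : PySem.Chars.find s sep = -1
  · rw [if_pos h, pv_splitOn_not_in sep hsep s ((PySem.Chars.find_eq_neg_one_iff _ _).mp h)]
    rfl
  · rw [if_neg h]
    have hnn : 0 ≤ PySem.Chars.find s sep := by
      have := PySem.Chars.neg_one_le_find s sep
      omega
    obtain ⟨hpre, hmin⟩ := PySem.Chars.find_spec hnn
    rw [pv_splitOn_first sep hsep (PySem.Chars.find s sep).toNat s hpre (fun i hi => hmin i hi)]
    rfl

theorem pv_headD_toList (L : List String) :
    (L.headD "").toList = (L.map String.toList).headD [] := by
  cases L <;> simp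

theorem pv_str_split_toList (s sep : String) (hsep : sep.toList ≠ []) :
    (((PySem.Str.split? s sep).getD []).map String.toList)
      = PySem.Chars.splitOn s.toList sep.toList := by
  have h := PySem.Str.split?_map s sep
  have hc : PySem.Chars.split? s.toList sep.toList
      = some (PySem.Chars.splitOn s.toList sep.toList) := by
    simp [PySem.Chars.split?, List.isEmpty_iff, hsep]
  rw [hc] at h
  cases hE : PySem.Str.split? s sep with
  | none => rw [hE] at h; simp at h
  | some L =>
    rw [hE] at h
    simp at h ⊢
    exact h

theorem pv_pyGet?_one {α : Type} (l : List α) : PySem.List.pyGet? l 1 = l[1]? := by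
  simp only [PySem.List.pyGet?, PySem.List.pyIdx?]
  norm_num
  split
  · simp
  · rw [List.getElem?_eq_none (by omega)]
    simp

theorem pv_prefix_single (c : Char) (l : List Char) : [c] <+: l ↔ l.head? = some c := by
  cases l with
  | nil => simp
  | cons a t => simp [List.cons_prefix_cons, eq_comm]

-- ==== rfind '.' characterisation (for the extension branch) ====
theorem pv_prefix_dot (l : List Char) : (['.'].isPrefixOf l = true) ↔ l.head? = some '.' := by
  rw [List.isPrefixOf_iff_prefix]
  cases l with
  | nil => simp
  | cons a l => simp [List.cons_prefix_cons, eq_comm]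

theorem pv_go_dot (t : List Char) (j : Nat) :
    (PySem.Chars.rfind.go t ['.'] j = -1 ∧ ∀ i, i ≤ j → ¬ (['.'].isPrefixOf (t.drop i) = true))
    ∨ (∃ dn : Nat, dn ≤ j ∧ PySem.Chars.rfind.go t ['.'] j = (dn : Int) ∧
        ['.'].isPrefixOf (t.drop dn) = true ∧
        ∀ i, dn < i → i ≤ j → ¬ (['.'].isPrefixOf (t.drop i) = true)) := by
  induction j with
  | zero =>
    by_cases h : ['.'].isPrefixOf (t.drop 0) = true
    · right
      exact ⟨0, le_refl 0, by simpa [PySem.Chars.rfind.go] using h, h, fun i h1 h2 => by omega⟩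
    · left
      refine ⟨?_, ?_⟩
      · simp only [List.drop_zero] at h
        simp [PySem.Chars.rfind.go, h]
      · intro i hi
        have : i = 0 := by omega
        simpa [this] using h
  | succ j ih =>
    by_cases h : ['.'].isPrefixOf (t.drop (j + 1)) = true
    · right
      exact ⟨j + 1, le_refl _, by simp [PySem.Chars.rfind.go, h], h, fun i h1 h2 => by omega⟩
    · rcases ih with ⟨h1, h2⟩ | ⟨dn, hle, heq, hp, htail⟩
      · left
        refine ⟨by simp [PySem.Chars.rfind.go, h, h1], ?_⟩
        intro i hi
        rcases Nat.eq_or_lt_of_le hi with rfl | hlt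
        · exact h
        · exact h2 i (by omega)
      · right
        refine ⟨dn, by omega, by simp [PySem.Chars.rfind.go, h, heq], hp, ?_⟩
        intro i h1' h2'
        rcases Nat.eq_or_lt_of_le h2' with rfl | hlt
        · exact h
        · exact htail i h1' (by omega)

theorem pv_rfind_dot (t : List Char) :
    (PySem.Chars.rfind t ['.'] = -1 ∧ '.' ∉ t)
    ∨ ∃ dn : Nat, PySem.Chars.rfind t ['.'] = (dn : Int) ∧
        t.drop dn = '.' :: t.drop (dn + 1) ∧ '.' ∉ t.drop (dn + 1) := by
  have hrf : PySem.Chars.rfind t ['.'] = PySem.Chars.rfind.go t ['.'] t.length := rfl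
  rcases pv_go_dot t t.length with ⟨h1, h2⟩ | ⟨dn, hle, heq, hp, htail⟩
  · left
    refine ⟨hrf ▸ h1, ?_⟩
    intro hmem
    obtain ⟨i, hi, hget⟩ := List.mem_iff_getElem.mp hmem
    exact h2 i (by omega) (by rw [pv_prefix_dot, List.head?_drop, List.getElem?_eq_getElem hi, hget])
  · right
    have hhead : (t.drop dn).head? = some '.' := (pv_prefix_dot _).mp hp
    rw [List.head?_drop] at hhead
    have hdnlt : dn < t.length := by
      by_contra hc
      rw [List.getElem?_eq_none (by omega)] at hhead
      simp at hhead
    have hget : t[dn] = '.' := by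
      rw [List.getElem?_eq_getElem hdnlt] at hhead
      exact Option.some.inj hhead
    refine ⟨dn, hrf ▸ heq, ?_, ?_⟩
    · rw [List.drop_eq_getElem_cons hdnlt, hget]
    · intro hmem
      obtain ⟨k, hk, hgk⟩ := List.mem_iff_getElem.mp hmem
      have hlen : dn + 1 + k < t.length := by
        have := List.length_drop (l := t) (i := dn + 1)
        omega
      have : t[dn + 1 + k] = '.' := by
        rw [List.getElem_drop] at hgk
        exact hgk
      exact htail (dn + 1 + k) (by omega) (by omega)
        (by rw [pv_prefix_dot, List.head?_drop, List.getElem?_eq_getElem hlen, this])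

theorem pv_suffix_dot (u r w : List Char) (hr : '.' ∉ r) (hw : '.' ∉ w) :
    ('.' :: w) <:+ (u ++ '.' :: r) ↔ w = r := by
  constructor
  · intro h
    have hsr : ('.' :: r) <:+ (u ++ '.' :: r) := List.suffix_append u ('.' :: r)
    rcases List.suffix_or_suffix_of_suffix h hsr with h' | h'
    · rcases List.suffix_cons_iff.mp h' with he | h''
      · exact (List.cons.injEq _ _ _ _ ▸ he).2
      · exact absurd (h''.subset (List.mem_cons_self)) hr
    · rcases List.suffix_cons_iff.mp h' with he | h''
      · exact ((List.cons.injEq _ _ _ _ ▸ he).2).symm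
      · exact absurd (h''.subset (List.mem_cons_self)) hw
  · rintro rfl
    exact List.suffix_append u ('.' :: w)

theorem pv_string_eq_iff (k key : String) (lw lr : List Char)
    (hk : k.toList = lw) (hkey : key.toList = lr) : (k = key) ↔ (lw = lr) := by
  constructor
  · rintro rfl; rw [← hk, ← hkey]
  · intro h; exact String.ext (by rw [hk, hkey, h])

-- A's endswith scan over the map equals B's last-dot lookup, on any common string s
theorem pv_ext_eq (s : String) :
    pvExtMapA.items.findSome? (fun p => if PySem.Str.endswith s p.1 then some p.2 else none)
    = (if PySem.Str.rfind s "." = -1 then none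
       else pvExtMapB.get? (PySem.Str.slice s (some (PySem.Str.rfind s ".")) none)) := by
  have hitems : pvExtMapA.items =
      [(".jpg", "image/jpeg"), (".jpeg", "image/jpeg"), (".png", "image/png"),
       (".gif", "image/gif"), (".webp", "image/webp"), (".svg", "image/svg+xml"),
       (".ico", "image/x-icon"), (".bmp", "image/bmp"), (".avif", "image/avif")] := by decide
  have hdot : (".".toList : List Char) = ['.'] := by decide
  rcases pv_rfind_dot s.toList with ⟨hneg, hnm⟩ | ⟨dn, heq, hdrop, hnr⟩
  · have hrf : PySem.Str.rfind s "." = -1 := by rw [PySem.Str.rfind_eq, hdot]; exact hneg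
    have hfalse : ∀ (w : List Char), '.' ∈ w → PySem.Chars.endswith s.toList w = false := by
      intro w hkmem
      rw [Bool.eq_false_iff]
      intro hc
      exact hnm (((PySem.Chars.endswith_iff _ _).mp hc).subset hkmem)
    simp [hitems, hneg,
      hfalse ['.','j','p','g'] (by decide), hfalse ['.','j','p','e','g'] (by decide),
      hfalse ['.','p','n','g'] (by decide), hfalse ['.','g','i','f'] (by decide),
      hfalse ['.','w','e','b','p'] (by decide), hfalse ['.','s','v','g'] (by decide),
      hfalse ['.','i','c','o'] (by decide), hfalse ['.','b','m','p'] (by decide),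
      hfalse ['.','a','v','i','f'] (by decide)]
  · have hrf : PySem.Str.rfind s "." = (dn : Int) := by rw [PySem.Str.rfind_eq, hdot]; exact heq
    have hne : ((dn : Int) ≠ -1) := by omega
    set r := s.toList.drop (dn + 1) with hrdef
    have hkey : (PySem.Str.slice s (some ((dn : Nat) : Int)) none).toList = '.' :: r := by
      rw [PySem.Str.toList_slice]
      show PySem.List.slice s.toList (some ((dn : Nat) : Int)) none = '.' :: r
      rw [PySem.List.slice_from _ (by positivity)]
      simpa using hdrop
    have ht : s.toList = s.toList.take dn ++ '.' :: r := by
      conv_lhs => rw [← List.take_append_drop dn s.toList]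
      rw [hdrop]
    have hend : ∀ (w : List Char), '.' ∉ w →
        PySem.Chars.endswith s.toList ('.' :: w) = decide (w = r) := by
      intro w hnw
      rcases Decidable.em (w = r) with h | h
      · simp only [h, decide_true]
        rw [PySem.Chars.endswith_iff, ht]
        exact List.suffix_append _ _
      · simp only [h, decide_false]
        rw [Bool.eq_false_iff]
        intro hc
        have hsfx := (PySem.Chars.endswith_iff _ _).mp hc
        rw [ht] at hsfx
        exact h ((pv_suffix_dot _ _ _ hnr hnw).mp hsfx)
    have e1 := hend ['j','p','g'] (by decide)
    have e2 := hend ['j','p','e','g'] (by decide)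
    have e3 := hend ['p','n','g'] (by decide)
    have e4 := hend ['g','i','f'] (by decide)
    have e5 := hend ['w','e','b','p'] (by decide)
    have e6 := hend ['s','v','g'] (by decide)
    have e7 := hend ['i','c','o'] (by decide)
    have e8 := hend ['b','m','p'] (by decide)
    have e9 := hend ['a','v','i','f'] (by decide)
    have hkiff : ∀ (k : String) (w : List Char), k.toList = '.' :: w →
        ((k = PySem.Str.slice s (some ((dn : Nat) : Int)) none) ↔ (w = r)) := by
      intro k w hkw
      have := pv_string_eq_iff k _ ('.' :: w) ('.' :: r) hkw hkey
      simpa using this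
    have k1 := hkiff ".jpg" ['j','p','g'] (by decide)
    have k2 := hkiff ".jpeg" ['j','p','e','g'] (by decide)
    have k3 := hkiff ".png" ['p','n','g'] (by decide)
    have k4 := hkiff ".gif" ['g','i','f'] (by decide)
    have k5 := hkiff ".webp" ['w','e','b','p'] (by decide)
    have k6 := hkiff ".svg" ['s','v','g'] (by decide)
    have k7 := hkiff ".ico" ['i','c','o'] (by decide)
    have k8 := hkiff ".bmp" ['b','m','p'] (by decide)
    have k9 := hkiff ".avif" ['a','v','i','f'] (by decide)
    have hB : pvExtMapB = PySem.Dict.mk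
      [(".jpg", "image/jpeg"), (".jpeg", "image/jpeg"), (".png", "image/png"),
       (".gif", "image/gif"), (".webp", "image/webp"), (".svg", "image/svg+xml"),
       (".ico", "image/x-icon"), (".bmp", "image/bmp"), (".avif", "image/avif")] := by decide
    rw [hitems, hrf, if_neg hne, hB]
    by_cases h1 : ['j','p','g'] = r
    · simp [e1, k1, PySem.Dict.get?_mk_cons, h1]
    by_cases h2 : ['j','p','e','g'] = r
    · simp [e1, e2, k1, k2, PySem.Dict.get?_mk_cons, h1, h2]
    by_cases h3 : ['p','n','g'] = r
    · simp [e1, e2, e3, k1, k2, k3, PySem.Dict.get?_mk_cons, h1, h2, h3]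
    by_cases h4 : ['g','i','f'] = r
    · simp [e1, e2, e3, e4, k1, k2, k3, k4, PySem.Dict.get?_mk_cons, h1, h2, h3, h4]
    by_cases h5 : ['w','e','b','p'] = r
    · simp [e1, e2, e3, e4, e5, k1, k2, k3, k4, k5, PySem.Dict.get?_mk_cons,
        h1, h2, h3, h4, h5]
    by_cases h6 : ['s','v','g'] = r
    · simp [e1, e2, e3, e4, e5, e6, k1, k2, k3, k4, k5, k6,
        PySem.Dict.get?_mk_cons, h1, h2, h3, h4, h5, h6]
    by_cases h7 : ['i','c','o'] = r
    · simp [e1, e2, e3, e4, e5, e6, e7, k1, k2, k3, k4, k5, k6, k7,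
        PySem.Dict.get?_mk_cons, h1, h2, h3, h4, h5, h6, h7]
    by_cases h8 : ['b','m','p'] = r
    · simp [e1, e2, e3, e4, e5, e6, e7, e8, k1, k2, k3, k4, k5, k6, k7, k8,
        PySem.Dict.get?_mk_cons, h1, h2, h3, h4, h5, h6, h7, h8]
    by_cases h9 : ['a','v','i','f'] = r
    · simp [e1, e2, e3, e4, e5, e6, e7, e8, e9, k1, k2, k3, k4, k5, k6, k7, k8, k9,
        PySem.Dict.get?_mk_cons, h1, h2, h3, h4, h5, h6, h7, h8, h9]
    · simp [e1, e2, e3, e4, e5, e6, e7, e8, e9, k1, k2, k3, k4, k5, k6, k7, k8, k9,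
        PySem.Dict.get?, h1, h2, h3, h4, h5, h6, h7, h8, h9]

-- first option value of a nonempty list
theorem pv_getElem?_zero_ne_nil {α : Type} [Inhabited α] (xs : List α) (h : xs ≠ []) :
    xs[0]? = some (xs.headD default) := by
  cases xs with
  | nil => exact absurd rfl h
  | cons a t => rfl

-- the two data-URL headers agree
theorem pv_header_eq (src : String) :
    ((PySem.Str.split? src ",").getD []).headD ""
      = (if PySem.Str.find src "," = -1 then src
         else PySem.Str.slice src none (some (PySem.Str.find src ","))) := by
  apply String.ext
  rw [pv_headD_toList, pv_str_split_toList src "," (by decide),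
    pv_split_head ",".toList (by decide) src.toList]
  by_cases h : PySem.Str.find src "," = -1
  · rw [if_pos h, if_pos (by rw [← PySem.Str.find_eq]; exact h)]
  · have hnn : 0 ≤ PySem.Str.find src "," := by
      have := PySem.Chars.neg_one_le_find src.toList ",".toList
      rw [← PySem.Str.find_eq] at this
      omega
    rw [if_neg h, if_neg (by rw [← PySem.Str.find_eq]; exact h)]
    rw [PySem.Str.toList_slice, PySem.Chars.slice_eq_listSlice,
      PySem.List.slice_to _ hnn, PySem.Str.find_eq]

-- head-of-split at String level (used for '?'-stripping and the ';' tail cut)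
theorem pv_str_split_head (s sep : String) (hsep : sep.toList ≠ []) :
    (((PySem.Str.split? s sep).getD []).headD "").toList
      = if PySem.Chars.find s.toList sep.toList = -1 then s.toList
        else s.toList.take (PySem.Chars.find s.toList sep.toList).toNat := by
  rw [pv_headD_toList, pv_str_split_toList s sep hsep, pv_split_head sep.toList hsep s.toList]

-- find-then-slice at String level
theorem pv_cut_toList (s sep : String) :
    ((if PySem.Str.find s sep = -1 then s
      else PySem.Str.slice s none (some (PySem.Str.find s sep)))).toList
      = if PySem.Chars.find s.toList sep.toList = -1 then s.toList
        else s.toList.take (PySem.Chars.find s.toList sep.toList).toNat := by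
  by_cases h : PySem.Str.find s sep = -1
  · rw [if_pos h, if_pos (by rw [← PySem.Str.find_eq]; exact h)]
  · have hnn : 0 ≤ PySem.Str.find s sep := by
      have := PySem.Chars.neg_one_le_find s.toList sep.toList
      rw [← PySem.Str.find_eq] at this
      omega
    rw [if_neg h, if_neg (by rw [← PySem.Str.find_eq]; exact h)]
    rw [PySem.Str.toList_slice, PySem.Chars.slice_eq_listSlice,
      PySem.List.slice_to _ hnn, PySem.Str.find_eq]

-- ===== VERDICT (by name: the statement is the Claim_ definition above) =====
set_option maxHeartbeats 1000000 in
theorem detect_image_mime_type_py_spec : Claim_equal_detect_image_mime_type_py := by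
  intro src _
  unfold Spec_detect_image_mime_type_py detect_image_mime_type_py detect_image_mime_type_py_alt
  by_cases h0 : src = ""
  · subst h0
    decide
  · rw [if_neg h0]
    have hslt : (PySem.Str.slice src none (some 5)).toList = src.toList.take 5 := by
      rw [PySem.Str.toList_slice, PySem.Chars.slice_eq_listSlice,
        PySem.List.slice_to _ (by norm_num)]
      congr 1
    have hcond : (PySem.Str.slice src none (some 5) = "data:")
        ↔ PySem.Str.startswith src "data:" = true := by
      rw [PySem.Str.startswith_eq, PySem.Chars.startswith_iff, List.prefix_iff_eq_take,
        show ("data:".toList).length = 5 from by decide]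
      constructor
      · intro h
        have := congrArg String.toList h
        rw [hslt] at this
        exact this.symm
      · intro h
        apply String.ext
        rw [hslt, ← h]
    by_cases hd : PySem.Str.startswith src "data:" = true
    · rw [if_pos hd, if_pos (hcond.mpr hd)]
      dsimp only
      rw [pv_header_eq src]
      set hB := (if PySem.Str.find src "," = -1 then src
         else PySem.Str.slice src none (some (PySem.Str.find src ","))) with hBdef
      have hguard : PySem.Str.isIn ";" hB = true ↔ ¬ (PySem.Str.find hB ";" = -1) := by
        rw [PySem.Str.isIn_eq, PySem.Chars.isIn_iff_infix, PySem.Str.find_eq,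
          ← PySem.Chars.find_ne_neg_one_iff]
      by_cases hsemi : PySem.Str.find hB ";" = -1
      · rw [if_pos hsemi, if_neg (fun hc => (hguard.mp hc) hsemi)]
      · rw [if_pos (hguard.mpr hsemi), if_neg hsemi]
        have hpre : "data:".toList <+: src.toList := by
          rw [PySem.Str.startswith_eq, PySem.Chars.startswith_iff] at hd
          exact hd
        have hsemiH : ';' ∈ hB.toList := by
          have h1 : PySem.Chars.find hB.toList ";".toList ≠ -1 := by
            rw [← PySem.Str.find_eq]; exact hsemi
          exact ((PySem.Chars.find_ne_neg_one_iff _ _).mp h1).subset (by decide)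
        have h5src : "data:".toList = src.toList.take 5 := by
          rw [List.prefix_iff_eq_take, show ("data:".toList).length = 5 from by decide] at hpre
          exact hpre
        have hdH : "data:".toList <+: hB.toList := by
          rw [hBdef] at hsemiH ⊢
          by_cases hc : PySem.Str.find src "," = -1
          · rw [if_pos hc]; exact hpre
          · rw [if_neg hc] at hsemiH ⊢
            have hnn : 0 ≤ PySem.Str.find src "," := by
              have := PySem.Chars.neg_one_le_find src.toList ",".toList
              rw [← PySem.Str.find_eq] at this
              omega
            have hsl : (PySem.Str.slice src none (some (PySem.Str.find src ","))).toList
                = src.toList.take (PySem.Str.find src ",").toNat := by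
              rw [PySem.Str.toList_slice, PySem.Chars.slice_eq_listSlice,
                PySem.List.slice_to _ hnn]
            rw [hsl] at hsemiH ⊢
            set cN := (PySem.Str.find src ",").toNat with hcN
            by_cases h5 : 5 ≤ cN
            · rw [List.prefix_iff_eq_take, show ("data:".toList).length = 5 from by decide,
                List.take_take, show min 5 cN = 5 from by omega]
              exact h5src
            · exfalso
              have htk : List.take cN ("data:".toList) = List.take cN src.toList := by
                rw [h5src, List.take_take, show min cN 5 = cN from by omega]
              rw [← htk] at hsemiH
              exact absurd (List.take_subset _ _ hsemiH) (by decide)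
        have h5H : "data:".toList = hB.toList.take 5 := by
          rw [List.prefix_iff_eq_take, show ("data:".toList).length = 5 from by decide] at hdH
          exact hdH
        have Heq : hB.toList = 'd' :: 'a' :: 't' :: 'a' :: ':' :: hB.toList.drop 5 := by
          conv_lhs => rw [← List.take_append_drop 5 hB.toList, ← h5H]
          rfl
        have hpre4 : ":".toList <+: hB.toList.drop 4 := by
          have hr4 : hB.toList.drop 4 = ':' :: hB.toList.drop 5 := by
            conv_lhs => rw [Heq]
            simp
          rw [show (":".toList) = [':'] from by decide, hr4]
          exact (pv_prefix_single _ _).mpr rfl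
        have hmin4 : ∀ i, i < 4 → ¬ (":".toList <+: hB.toList.drop i) := by
          intro i hi
          rw [show (":".toList) = [':'] from by decide, pv_prefix_single]
          interval_cases i <;> rw [Heq] <;> simp
        have hfind4 : PySem.Chars.find hB.toList ":".toList = ((4 : Nat) : Int) :=
          pv_find_eq_of_first _ _ 4 hpre4 hmin4
        have hsplitH : PySem.Chars.splitOn hB.toList ":".toList
            = hB.toList.take 4 :: PySem.Chars.splitOn (hB.toList.drop 5) ":".toList := by
          have := pv_splitOn_first ":".toList (by decide) 4 hB.toList hpre4 hmin4
          simpa using this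
        have hLmap := pv_str_split_toList hB ":" (by decide)
        have h1map : Option.map String.toList ((PySem.Str.split? hB ":").getD [])[1]?
            = some ((PySem.Chars.splitOn (hB.toList.drop 5) ":".toList).headD []) := by
          rw [← List.getElem?_map, hLmap, hsplitH]
          simp only [List.getElem?_cons_succ]
          exact pv_getElem?_zero_ne_nil _ (pv_splitOn_ne_nil _ _ (by decide))
        obtain ⟨part, hpart, hpartL⟩ : ∃ part, ((PySem.Str.split? hB ":").getD [])[1]? = some part
            ∧ part.toList = (PySem.Chars.splitOn (hB.toList.drop 5) ":".toList).headD [] := by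
          cases hL : ((PySem.Str.split? hB ":").getD [])[1]? with
          | none => rw [hL] at h1map; simp at h1map
          | some p =>
            rw [hL] at h1map
            exact ⟨p, rfl, by simpa using h1map⟩
        rw [pv_pyGet?_one, hpart]
        refine congrArg some (String.ext ?_)
        have hfindStr4 : PySem.Str.find hB ":" = 4 := by
          rw [PySem.Str.find_eq, hfind4]
          norm_num
        have hmid : (PySem.Str.slice hB (some (PySem.Str.find hB ":" + 1)) none).toList
            = hB.toList.drop 5 := by
          rw [hfindStr4, PySem.Str.toList_slice, PySem.Chars.slice_eq_listSlice,
            PySem.List.slice_from _ (by norm_num)]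
          norm_num
          simp
        set mid := PySem.Str.slice hB (some (PySem.Str.find hB ":" + 1)) none with hmiddef
        have hmid2 : (if PySem.Str.find mid ":" = -1 then mid
            else PySem.Str.slice mid none (some (PySem.Str.find mid ":"))).toList
            = part.toList := by
          rw [pv_cut_toList, hmid, hpartL,
            pv_split_head ":".toList (by decide) (hB.toList.drop 5)]
        set mid2 := (if PySem.Str.find mid ":" = -1 then mid
            else PySem.Str.slice mid none (some (PySem.Str.find mid ":"))) with hmid2def
        have hfinal : PySem.Str.find mid2 ";" = PySem.Str.find part ";" := by
          rw [PySem.Str.find_eq, PySem.Str.find_eq, hmid2]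
        rw [pv_str_split_head part ";" (by decide)]
        rw [show (if PySem.Str.find mid2 ";" = -1 then mid2
            else PySem.Str.slice mid2 none (some (PySem.Str.find mid2 ";"))).toList
            = if PySem.Chars.find mid2.toList ";".toList = -1 then mid2.toList
              else mid2.toList.take (PySem.Chars.find mid2.toList ";".toList).toNat
          from pv_cut_toList mid2 ";"]
        rw [hmid2]
    · rw [if_neg hd, if_neg (fun hc => hd (hcond.mp hc))]
      dsimp only
      have hbase : ((PySem.Str.split? (PySem.Str.lower src) "?").getD []).headD ""
          = (if PySem.Str.find (PySem.Str.lower src) "?" = -1 then PySem.Str.lower src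
             else PySem.Str.slice (PySem.Str.lower src) none
               (some (PySem.Str.find (PySem.Str.lower src) "?"))) := by
        apply String.ext
        rw [pv_str_split_head _ "?" (by decide)]
        by_cases h : PySem.Str.find (PySem.Str.lower src) "?" = -1
        · rw [if_pos (by rw [← PySem.Str.find_eq]; exact h), if_pos h]
        · have hnn : 0 ≤ PySem.Str.find (PySem.Str.lower src) "?" := by
            have := PySem.Chars.neg_one_le_find (PySem.Str.lower src).toList "?".toList
            rw [← PySem.Str.find_eq] at this
            omega
          rw [if_neg (by rw [← PySem.Str.find_eq]; exact h), if_neg h]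
          rw [PySem.Str.toList_slice, PySem.Chars.slice_eq_listSlice,
            PySem.List.slice_to _ hnn, PySem.Str.find_eq]
      rw [hbase]
      exact pv_ext_eq _
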